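-- pv_equiv track=rewrite | github.com/bk-bf/text-based-terminal-game | fantasy_rpg/actions/action_handler.py | _get_interaction_skill_and_dc
-- ===== SOURCE A (Python) =====
-- def _get_interaction_skill_and_dc(interaction_type: str, object_name: str) -> tuple[str, str, int]:
--     """
--     Get the primary skill, secondary skill, and DC for an interaction type on an object.
--
--     Returns:
--         (primary_skill, secondary_skill, dc)
--     """
--     object_lower = object_name.lower()
--
--     # Berry bushes and food sources
--     if "berry" in object_lower:
--         if interaction_type in ["forage", "harvest", "gather", "pick"]:
--             return ("nature", None, 12)  # High risk/high reward
--         elif interaction_type in ["search"]: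
--             return ("perception", "nature", 10)  # Medium risk/medium reward
--         elif interaction_type in ["examine"]:
--             return ("perception", None, 8)  # Low risk/low reward
--         elif interaction_type in ["chop", "cut"]:
--             return ("athletics", "nature", 11)  # Alternative approach
--
--     # Trees and wood sources
--     elif any(wood_type in object_lower for wood_type in ["tree", "log", "wood"]):
--         if interaction_type in ["chop", "cut"]:
--             return ("athletics", "nature", 13)  # High risk/high reward
--         elif interaction_type in ["search"]:
--             return ("perception", "nature", 10)  # Medium risk/diverse reward
--         elif interaction_type in ["examine"]:
--             return ("perception", None, 9)  # Low risk/discovery reward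
--
--     # Containers and chests
--     elif any(container in object_lower for container in ["chest", "box", "container", "barrel"]):
--         if interaction_type in ["search"]:
--             return ("investigation", "perception", 12)  # Medium risk/high reward
--         elif interaction_type in ["examine"]:
--             return ("perception", None, 10)  # Low risk/medium reward
--         elif interaction_type in ["unlock"]:
--             return ("sleight_of_hand", "investigation", 15)  # High risk/high reward
--
--     # Wells and water sources
--     elif "well" in object_lower:
--         if interaction_type in ["search"]:
--             return ("investigation", "perception", 11)  # Medium risk/treasure reward
--         elif interaction_type in ["examine"]:
--             return ("perception", None, 9)  # Low risk/small reward
--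
--     # Default fallback
--     return ("perception", None, 10)
-- ===== SOURCE B (Python) =====
-- _KEYWORDS = [("berry", 0), ("tree", 1), ("log", 1), ("wood", 1),
--              ("chest", 2), ("box", 2), ("container", 2), ("barrel", 2),
--              ("well", 3)]
--
-- _COLUMNS = ["forage", "harvest", "gather", "pick", "search", "examine", "chop", "cut", "unlock"]
--
-- _D = ("perception", None, 10)
--
-- # Dense 5x10 outcome matrix: rows = category (berry, wood, container, well, none),
-- # columns = interaction (in _COLUMNS order) plus a final "anything else" column.
-- _MATRIX = [
--     [("nature", None, 12), ("nature", None, 12), ("nature", None, 12), ("nature", None, 12),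
--      ("perception", "nature", 10), ("perception", None, 8),
--      ("athletics", "nature", 11), ("athletics", "nature", 11), _D, _D],
--     [_D, _D, _D, _D,
--      ("perception", "nature", 10), ("perception", None, 9),
--      ("athletics", "nature", 13), ("athletics", "nature", 13), _D, _D],
--     [_D, _D, _D, _D,
--      ("investigation", "perception", 12), ("perception", None, 10),
--      _D, _D, ("sleight_of_hand", "investigation", 15), _D],
--     [_D, _D, _D, _D,
--      ("investigation", "perception", 11), ("perception", None, 9),
--      _D, _D, _D, _D],
--     [_D, _D, _D, _D, _D, _D, _D, _D, _D, _D],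
-- ]
--
--
-- def _get_interaction_skill_and_dc(interaction_type: str, object_name: str) -> tuple[str, str, int]:
--     """Row/column index computation into a dense outcome matrix instead of a branch chain."""
--     obj = object_name.lower()
--     row = 4
--     for kw, cat in _KEYWORDS:
--         if kw in obj:
--             row = cat
--             break
--     try:
--         col = _COLUMNS.index(interaction_type)
--     except ValueError:
--         col = 9
--     return _MATRIX[row][col]
-- ===== Notes on version B (the rewrite author's own statement) =====
-- stated objective: alternative
-- what changed: The nested if/elif branch chain is replaced by arithmetic indexing into a dense 5x10 outcome matrix: a flat keyword scan computes the row (category) index, list.index on the interaction names computes the column index, and the answer is a single matrix lookup.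
import Mathlib
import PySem

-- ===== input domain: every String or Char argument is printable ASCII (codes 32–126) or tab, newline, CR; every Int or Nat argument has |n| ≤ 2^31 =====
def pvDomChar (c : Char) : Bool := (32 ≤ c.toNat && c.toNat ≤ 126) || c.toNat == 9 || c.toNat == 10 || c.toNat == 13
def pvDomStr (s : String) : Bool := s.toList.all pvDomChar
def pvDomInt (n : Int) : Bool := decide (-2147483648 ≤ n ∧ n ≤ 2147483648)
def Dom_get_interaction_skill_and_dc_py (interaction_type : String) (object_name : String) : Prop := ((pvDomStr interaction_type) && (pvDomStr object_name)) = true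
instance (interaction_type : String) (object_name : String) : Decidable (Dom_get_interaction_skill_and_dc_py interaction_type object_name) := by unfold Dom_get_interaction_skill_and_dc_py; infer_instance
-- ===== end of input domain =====

-- B replaces A's nested if/elif chain by row/column index computation into a dense 5x10 outcome matrix (objective: alternative, same cost).

-- ===== PORT A =====
def get_interaction_skill_and_dc_py (interaction_type : String) (object_name : String) : String × Option String × Int :=
  let object_lower := PySem.Str.lower object_name
  if PySem.Str.isIn "berry" object_lower then
    if interaction_type ∈ ["forage", "harvest", "gather", "pick"] then ("nature", none, 12)
    else if interaction_type ∈ ["search"] then ("perception", some "nature", 10)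
    else if interaction_type ∈ ["examine"] then ("perception", none, 8)
    else if interaction_type ∈ ["chop", "cut"] then ("athletics", some "nature", 11)
    else ("perception", none, 10)
  else if ["tree", "log", "wood"].any (fun wood_type => PySem.Str.isIn wood_type object_lower) then
    if interaction_type ∈ ["chop", "cut"] then ("athletics", some "nature", 13)
    else if interaction_type ∈ ["search"] then ("perception", some "nature", 10)
    else if interaction_type ∈ ["examine"] then ("perception", none, 9)
    else ("perception", none, 10)
  else if ["chest", "box", "container", "barrel"].any (fun container => PySem.Str.isIn container object_lower) then
    if interaction_type ∈ ["search"] then ("investigation", some "perception", 12)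
    else if interaction_type ∈ ["examine"] then ("perception", none, 10)
    else if interaction_type ∈ ["unlock"] then ("sleight_of_hand", some "investigation", 15)
    else ("perception", none, 10)
  else if PySem.Str.isIn "well" object_lower then
    if interaction_type ∈ ["search"] then ("investigation", some "perception", 11)
    else if interaction_type ∈ ["examine"] then ("perception", none, 9)
    else ("perception", none, 10)
  else ("perception", none, 10)

-- ===== PORT B =====
def pvKeywords : List (String × Nat) :=
  [("berry", 0), ("tree", 1), ("log", 1), ("wood", 1),
   ("chest", 2), ("box", 2), ("container", 2), ("barrel", 2), ("well", 3)]

def pvColumns : List String :=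
  ["forage", "harvest", "gather", "pick", "search", "examine", "chop", "cut", "unlock"]

def pvD : String × Option String × Int := ("perception", none, 10)

def pvMatrix : List (List (String × Option String × Int)) :=
  [ [("nature", none, 12), ("nature", none, 12), ("nature", none, 12), ("nature", none, 12),
     ("perception", some "nature", 10), ("perception", none, 8),
     ("athletics", some "nature", 11), ("athletics", some "nature", 11), pvD, pvD],
    [pvD, pvD, pvD, pvD,
     ("perception", some "nature", 10), ("perception", none, 9),
     ("athletics", some "nature", 13), ("athletics", some "nature", 13), pvD, pvD],
    [pvD, pvD, pvD, pvD,
     ("investigation", some "perception", 12), ("perception", none, 10),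
     pvD, pvD, ("sleight_of_hand", some "investigation", 15), pvD],
    [pvD, pvD, pvD, pvD,
     ("investigation", some "perception", 11), ("perception", none, 9),
     pvD, pvD, pvD, pvD],
    [pvD, pvD, pvD, pvD, pvD, pvD, pvD, pvD, pvD, pvD] ]

def get_interaction_skill_and_dc_py_alt (interaction_type : String) (object_name : String) : String × Option String × Int :=
  let obj := PySem.Str.lower object_name
  -- flat keyword scan with early exit (the Python for/break loop)
  let row : Nat := match pvKeywords.find? (fun p => PySem.Str.isIn p.1 obj) with
                   | some p => p.2
                   | none => 4
  let col : Nat := (PySem.List.index? pvColumns interaction_type).getD 9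
  (pvMatrix.getD row []).getD col pvD

-- ===== PRECONDITION & SPEC =====
def Spec_get_interaction_skill_and_dc_py (interaction_type : String) (object_name : String) (out : String × Option String × Int) : Prop := out = get_interaction_skill_and_dc_py_alt interaction_type object_name
instance (interaction_type : String) (object_name : String) (out : String × Option String × Int) : Decidable (Spec_get_interaction_skill_and_dc_py interaction_type object_name out) := by unfold Spec_get_interaction_skill_and_dc_py; infer_instance

-- ===== CLAIM (what is proved, stated in full; the proofs are below) =====
def Claim_equal_get_interaction_skill_and_dc_py : Prop := ∀ (interaction_type : String) (object_name : String), Dom_get_interaction_skill_and_dc_py interaction_type object_name → Spec_get_interaction_skill_and_dc_py interaction_type object_name (get_interaction_skill_and_dc_py interaction_type object_name)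

-- ===== LEMMAS AND PROOFS =====

-- Column lookup in row i of the matrix agrees with A's branch chain for that category.
theorem pvRow_eq (it : String) (row : Nat) (hrow : row < 5) :
    ((pvMatrix.getD row []).getD ((PySem.List.index? pvColumns it).getD 9) pvD) =
    (if row = 0 then
      (if it ∈ ["forage", "harvest", "gather", "pick"] then (("nature", none, 12) : String × Option String × Int)
       else if it ∈ ["search"] then ("perception", some "nature", 10)
       else if it ∈ ["examine"] then ("perception", none, 8)
       else if it ∈ ["chop", "cut"] then ("athletics", some "nature", 11)
       else ("perception", none, 10))
     else if row = 1 then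
      (if it ∈ ["chop", "cut"] then ("athletics", some "nature", 13)
       else if it ∈ ["search"] then ("perception", some "nature", 10)
       else if it ∈ ["examine"] then ("perception", none, 9)
       else ("perception", none, 10))
     else if row = 2 then
      (if it ∈ ["search"] then ("investigation", some "perception", 12)
       else if it ∈ ["examine"] then ("perception", none, 10)
       else if it ∈ ["unlock"] then ("sleight_of_hand", some "investigation", 15)
       else ("perception", none, 10))
     else if row = 3 then
      (if it ∈ ["search"] then ("investigation", some "perception", 11)
       else if it ∈ ["examine"] then ("perception", none, 9)
       else ("perception", none, 10))
     else ("perception", none, 10)) := by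
  interval_cases row <;>
  · by_cases e1 : it = "forage"; · subst e1; decide
    by_cases e2 : it = "harvest"; · subst e2; decide
    by_cases e3 : it = "gather"; · subst e3; decide
    by_cases e4 : it = "pick"; · subst e4; decide
    by_cases e5 : it = "search"; · subst e5; decide
    by_cases e6 : it = "examine"; · subst e6; decide
    by_cases e7 : it = "chop"; · subst e7; decide
    by_cases e8 : it = "cut"; · subst e8; decide
    by_cases e9 : it = "unlock"; · subst e9; decide
    have hni : PySem.List.index? pvColumns it = none := by
      rw [PySem.List.index?_eq_none_iff]
      simp [pvColumns, e1, e2, e3, e4, e5, e6, e7, e8, e9]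
    simp only [PySem.List.index?_eq_idxOf?] at hni
    simp [hni, pvMatrix, pvD, e1, e2, e3, e4, e5, e6, e7, e8, e9]

-- ===== VERDICT (by name: the statement is the Claim_ definition above) =====
theorem get_interaction_skill_and_dc_py_spec : Claim_equal_get_interaction_skill_and_dc_py := by
  intro it on _
  show _ = _
  unfold get_interaction_skill_and_dc_py get_interaction_skill_and_dc_py_alt pvKeywords
  simp only [List.find?_cons, List.any_cons, List.any_nil, Bool.or_false]
  by_cases h1 : PySem.Str.isIn "berry" (PySem.Str.lower on) = true
  · simp only [h1, cond_true, cond_false, Bool.true_or, Bool.or_true, Bool.false_or,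
      Bool.false_eq_true, if_true, if_false]
    exact (pvRow_eq it 0 (by norm_num)).symm
  rw [Bool.not_eq_true] at h1
  by_cases h2t : PySem.Str.isIn "tree" (PySem.Str.lower on) = true
  · simp only [h1, h2t, cond_true, cond_false, Bool.true_or, Bool.or_true, Bool.false_or,
      Bool.false_eq_true, if_true, if_false]
    exact (pvRow_eq it 1 (by norm_num)).symm
  rw [Bool.not_eq_true] at h2t
  by_cases h2l : PySem.Str.isIn "log" (PySem.Str.lower on) = true
  · simp only [h1, h2t, h2l, cond_true, cond_false, Bool.true_or, Bool.or_true, Bool.false_or,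
      Bool.false_eq_true, if_true, if_false]
    exact (pvRow_eq it 1 (by norm_num)).symm
  rw [Bool.not_eq_true] at h2l
  by_cases h2w : PySem.Str.isIn "wood" (PySem.Str.lower on) = true
  · simp only [h1, h2t, h2l, h2w, cond_true, cond_false, Bool.true_or, Bool.or_true, Bool.false_or,
      Bool.false_eq_true, if_true, if_false]
    exact (pvRow_eq it 1 (by norm_num)).symm
  rw [Bool.not_eq_true] at h2w
  by_cases h3c : PySem.Str.isIn "chest" (PySem.Str.lower on) = true
  · simp only [h1, h2t, h2l, h2w, h3c, cond_true, cond_false, Bool.true_or, Bool.or_true, Bool.false_or,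
      Bool.false_eq_true, if_true, if_false]
    exact (pvRow_eq it 2 (by norm_num)).symm
  rw [Bool.not_eq_true] at h3c
  by_cases h3b : PySem.Str.isIn "box" (PySem.Str.lower on) = true
  · simp only [h1, h2t, h2l, h2w, h3c, h3b, cond_true, cond_false, Bool.true_or, Bool.or_true, Bool.false_or,
      Bool.false_eq_true, if_true, if_false]
    exact (pvRow_eq it 2 (by norm_num)).symm
  rw [Bool.not_eq_true] at h3b
  by_cases h3n : PySem.Str.isIn "container" (PySem.Str.lower on) = true
  · simp only [h1, h2t, h2l, h2w, h3c, h3b, h3n, cond_true, cond_false, Bool.true_or, Bool.or_true, Bool.false_or,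
      Bool.false_eq_true, if_true, if_false]
    exact (pvRow_eq it 2 (by norm_num)).symm
  rw [Bool.not_eq_true] at h3n
  by_cases h3r : PySem.Str.isIn "barrel" (PySem.Str.lower on) = true
  · simp only [h1, h2t, h2l, h2w, h3c, h3b, h3n, h3r, cond_true, cond_false, Bool.true_or, Bool.or_true, Bool.false_or,
      Bool.false_eq_true, if_true, if_false]
    exact (pvRow_eq it 2 (by norm_num)).symm
  rw [Bool.not_eq_true] at h3r
  by_cases h4 : PySem.Str.isIn "well" (PySem.Str.lower on) = true
  · simp only [h1, h2t, h2l, h2w, h3c, h3b, h3n, h3r, h4, cond_true, cond_false, Bool.true_or, Bool.or_true, Bool.false_or,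
      Bool.false_eq_true, if_true, if_false]
    exact (pvRow_eq it 3 (by norm_num)).symm
  rw [Bool.not_eq_true] at h4
  · simp only [h1, h2t, h2l, h2w, h3c, h3b, h3n, h3r, h4, cond_false, Bool.false_or, Bool.false_eq_true, if_false]
    exact (pvRow_eq it 4 (by norm_num)).symm
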